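-- pv_equiv track=rewrite | github.com/Laogeodritt/quasselflask | quasselflask.py | convert_glob_to_like
-- ===== SOURCE A (Python) =====
-- def convert_glob_to_like(s: str) -> (str, bool):
--     """
--     Converts a glob-style wildcard string to SQL LIKE syntax. Only handles conversion of * and ? to % and _, plus
--     escaped characters via '\' (no character classes).
--     :param s: Glob string to convert.
--     :return: (like_str, hasWildcards) - hasWildcards is True if a non-escaped wildcard was found.
--     """
--     if s is None:
--         return None
--
--     s_parse = []
--     is_escaped = False
--     has_wildcards = False
--     for c in s:
--         if is_escaped:
--             if c == '\\':
--                 s_parse.append('\\\\')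
--             elif c == '*' or c == '?':
--                 s_parse.append(c)
--             elif c == '_' or c == '%':
--                 s_parse.append('\\' + c)
--             else:
--                 s_parse.append(c)
--             is_escaped = False
--         else:
--             if c == '\\':
--                 is_escaped = True
--             elif c == '*':
--                 s_parse.append('%')
--                 has_wildcards = True
--             elif c == '?':
--                 s_parse.append('_')
--                 has_wildcards = True
--             elif c == '_' or c == '%':
--                 s_parse.append('\\' + c)
--             else:
--                 s_parse.append(c)
--     if is_escaped:
--         s_parse.append('\\')
--     return ''.join(s_parse), has_wildcards
-- ===== SOURCE B (Python) =====
-- def _plain(c):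
--     """LIKE piece for an unescaped character."""
--     return '%' if c == '*' else '_' if c == '?' else '\\' + c if c in '_%' else c
--
--
-- def _escd(c):
--     """LIKE piece for a backslash-escaped character."""
--     return '\\\\' if c == '\\' else '\\' + c if c in '_%' else c
--
--
-- def convert_glob_to_like(s: str) -> (str, bool):
--     """Staged rewrite: split on backslash first, then translate segments.
--     In segments after the first, the leading character is the escaped one;
--     an empty segment encodes an escaped (or trailing) backslash."""
--     if s is None:
--         return None
--     segs = s.split('\\')
--     pieces = [''.join(_plain(c) for c in segs[0])]
--     wild = any(c in '*?' for c in segs[0])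
--     i = 1
--     while i < len(segs):
--         seg = segs[i]
--         if seg:
--             body = seg[1:]
--             pieces.append(_escd(seg[0]))
--             i += 1
--         elif i + 1 < len(segs):
--             body = segs[i + 1]
--             pieces.append('\\\\')
--             i += 2
--         else:
--             body = ''
--             pieces.append('\\')
--             i += 1
--         pieces.append(''.join(_plain(c) for c in body))
--         wild = wild or any(c in '*?' for c in body)
--     return ''.join(pieces), wild
-- ===== Notes on version B (the rewrite author's own statement) =====
-- stated objective: alternative
-- what changed: Replaces A's single pass with a cross-iteration is_escaped flag by staged passes: split the string on backslash first, then translate each segment (the leading character of each later segment is the escaped one, empty segments encode escaped/trailing backslashes), with wildcard detection done per segment via any().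
import Mathlib
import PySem

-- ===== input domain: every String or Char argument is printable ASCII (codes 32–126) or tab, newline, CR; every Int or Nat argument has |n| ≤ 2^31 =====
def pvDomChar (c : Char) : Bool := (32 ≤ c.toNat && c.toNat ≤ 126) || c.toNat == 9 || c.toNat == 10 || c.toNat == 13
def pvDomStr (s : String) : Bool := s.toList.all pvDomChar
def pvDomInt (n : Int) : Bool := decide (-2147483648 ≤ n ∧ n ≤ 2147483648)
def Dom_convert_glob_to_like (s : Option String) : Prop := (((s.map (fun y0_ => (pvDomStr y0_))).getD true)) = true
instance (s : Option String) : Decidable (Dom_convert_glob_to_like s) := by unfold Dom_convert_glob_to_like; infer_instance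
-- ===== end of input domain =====

-- B is a staged re-decomposition (split on backslash, then translate segments) returning the same values; no speed claim.

-- ===== PORT A =====
-- the for-loop over s with (is_escaped, has_wildcards) state; output chars accumulated structurally (join = concat, exact)
def cgGoA : List Char → Bool → Bool → (List Char × Bool)
  | [], esc, w => (if esc then ['\\'] else [], w)
  | c :: rest, esc, w =>
    if esc then
      let piece : List Char :=
        if c = '\\' then ['\\', '\\']
        else if c = '*' ∨ c = '?' then [c]
        else if c = '_' ∨ c = '%' then ['\\', c]
        else [c]
      let r := cgGoA rest false w
      (piece ++ r.1, r.2)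
    else
      if c = '\\' then cgGoA rest true w
      else if c = '*' then let r := cgGoA rest false true; ('%' :: r.1, r.2)
      else if c = '?' then let r := cgGoA rest false true; ('_' :: r.1, r.2)
      else if c = '_' ∨ c = '%' then let r := cgGoA rest false w; ('\\' :: c :: r.1, r.2)
      else let r := cgGoA rest false w; (c :: r.1, r.2)

def convert_glob_to_like (s : Option String) : Option (String × Bool) :=
  match s with
  | none => none
  | some s =>
    let r := cgGoA s.toList false false
    some (String.ofList r.1, r.2)

-- ===== PORT B =====
-- _plain(c): LIKE piece for an unescaped character
def cgPlain (c : Char) : List Char :=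
  if c = '*' then ['%'] else if c = '?' then ['_']
  else if c = '_' ∨ c = '%' then ['\\', c] else [c]

-- _escd(c): LIKE piece for a backslash-escaped character
def cgEscd (c : Char) : List Char :=
  if c = '\\' then ['\\', '\\'] else if c = '_' ∨ c = '%' then ['\\', c] else [c]

-- ''.join(_plain(c) for c in seg)
def cgPlainSeg (seg : List Char) : List Char := (seg.map cgPlain).flatten

-- any(c in '*?' for c in seg)
def cgSegWild (seg : List Char) : Bool := seg.any (fun c => c = '*' ∨ c = '?')

-- the while loop over segs[1:], wild threaded forward, pieces accumulated
def cgGoSegs : List (List Char) → Bool → (List Char × Bool)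
  | [], w => ([], w)
  | (c :: body) :: rest, w =>
      let r := cgGoSegs rest (w || cgSegWild body)
      (cgEscd c ++ cgPlainSeg body ++ r.1, r.2)
  | [[]], w => (['\\'], w)
  | [] :: seg :: rest, w =>
      let r := cgGoSegs rest (w || cgSegWild seg)
      ('\\' :: '\\' :: cgPlainSeg seg ++ r.1, r.2)

def convert_glob_to_like_alt (s : Option String) : Option (String × Bool) :=
  match s with
  | none => none
  | some s =>
    match PySem.Chars.splitOn s.toList ['\\'] with
    | [] => none  -- unreachable: split always yields at least one segment
    | seg0 :: rest =>
      let r := cgGoSegs rest (cgSegWild seg0)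
      some (String.ofList (cgPlainSeg seg0 ++ r.1), r.2)

-- ===== PRECONDITION & SPEC =====
def Spec_convert_glob_to_like (s : Option String) (out : Option (String × Bool)) : Prop := out = convert_glob_to_like_alt s
instance (s : Option String) (out : Option (String × Bool)) : Decidable (Spec_convert_glob_to_like s out) := by unfold Spec_convert_glob_to_like; infer_instance

-- ===== CLAIM (what is proved, stated in full; the proofs are below) =====
def Claim_equal_convert_glob_to_like : Prop := ∀ (s : Option String), Dom_convert_glob_to_like s → Spec_convert_glob_to_like s (convert_glob_to_like s)

-- ===== LEMMAS AND PROOFS =====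

-- simple accumulator-free characterisation of split on a single backslash
def cgBsplit : List Char → List (List Char)
  | [] => [[]]
  | c :: rest =>
    if c = '\\' then [] :: cgBsplit rest
    else (c :: (cgBsplit rest).headI) :: (cgBsplit rest).tail

theorem cgBsplit_ne_nil (cs : List Char) : cgBsplit cs ≠ [] := by
  cases cs
  · simp [cgBsplit]
  · simp [cgBsplit]; split <;> simp

theorem cgHeadTail (l : List (List Char)) (h : l ≠ []) : l.headI :: l.tail = l := by
  cases l with
  | nil => exact absurd rfl h
  | cons a t => rfl

theorem cgSplitOn_go_spec (cs : List Char) : ∀ (fuel : Nat) (cur : List Char) (acc : List (List Char)),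
    cs.length ≤ fuel →
    PySem.Chars.splitOn.go ['\\'] fuel cs cur acc
      = acc.reverse ++ (cur.reverse ++ (cgBsplit cs).headI) :: (cgBsplit cs).tail := by
  induction cs with
  | nil =>
    intro fuel cur acc _
    cases fuel <;> simp [PySem.Chars.splitOn.go, cgBsplit]
  | cons c rest ih =>
    intro fuel cur acc hle
    cases fuel with
    | zero => simp at hle
    | succ n =>
      have hn : rest.length ≤ n := by simpa using hle
      by_cases hc : c = '\\'
      · subst hc
        rw [PySem.Chars.splitOn.go]
        simp only [List.isPrefixOf, List.length]
        rw [if_pos (by simp)]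
        simp only [List.drop_succ_cons, List.drop_zero, Nat.zero_add]
        rw [ih n [] (cur.reverse :: acc) hn]
        simp [cgBsplit]
        exact cgHeadTail _ (cgBsplit_ne_nil rest)
      · rw [PySem.Chars.splitOn.go]
        rw [if_neg (by simp [List.isPrefixOf]; exact fun h => hc h.symm)]
        rw [ih n (c :: cur) acc hn]
        simp [cgBsplit, hc]

theorem cgSplitOn_eq (cs : List Char) :
    PySem.Chars.splitOn cs ['\\'] = cgBsplit cs := by
  unfold PySem.Chars.splitOn
  rw [cgSplitOn_go_spec cs (cs.length + 1) [] [] (by omega)]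
  simp
  exact cgHeadTail _ (cgBsplit_ne_nil cs)

-- top-level segment processing (first segment unescaped, rest via the loop)
def cgF : List (List Char) → Bool → (List Char × Bool)
  | [], w => ([], w)
  | seg0 :: rest, w =>
    let r := cgGoSegs rest (w || cgSegWild seg0)
    (cgPlainSeg seg0 ++ r.1, r.2)

theorem cgSegWild_cons (c : Char) (h : List Char) :
    cgSegWild (c :: h) = (decide (c = '*' ∨ c = '?') || cgSegWild h) := by
  simp [cgSegWild]

-- the heart: B's staged passes equal A's one-pass state machine (both escape states)
theorem cgMain (cs : List Char) :
    (∀ w, cgF (cgBsplit cs) w = cgGoA cs false w)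
    ∧ (∀ w, cgGoSegs (cgBsplit cs) w = cgGoA cs true w) := by
  induction cs with
  | nil =>
    constructor <;> intro w <;> simp [cgBsplit, cgF, cgGoSegs, cgGoA, cgPlainSeg, cgSegWild]
  | cons c rest ih =>
    obtain ⟨ih1, ih2⟩ := ih
    have hsplit := cgHeadTail _ (cgBsplit_ne_nil rest)
    constructor
    · intro w
      by_cases hc : c = '\\'
      · subst hc
        have := ih2 w
        simp only [cgBsplit, cgGoA, ← this, cgF]
        rw [← hsplit]
        simp [cgPlainSeg, cgSegWild]
      · have hA : cgGoA (c :: rest) false w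
            = (cgPlain c ++ (cgGoA rest false (w || decide (c = '*' ∨ c = '?'))).1,
               (cgGoA rest false (w || decide (c = '*' ∨ c = '?'))).2) := by
          by_cases h1 : c = '*'
          · subst h1; simp [cgGoA, cgPlain]
          · by_cases h2 : c = '?'
            · subst h2; simp [cgGoA, cgPlain]
            · by_cases h3 : c = '_' ∨ c = '%'
              · simp [cgGoA, cgPlain, hc, h1, h2, h3]
              · simp [cgGoA, cgPlain, hc, h1, h2, h3]
        rw [hA, ← ih1 (w || decide (c = '*' ∨ c = '?'))]
        simp only [cgBsplit, if_neg hc, cgF]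
        rw [← hsplit]
        simp [cgPlainSeg, cgSegWild_cons, Bool.or_assoc]
    · intro w
      by_cases hc : c = '\\'
      · subst hc
        have := ih1 w
        simp only [cgBsplit]
        rw [← hsplit]
        simp only [cgGoA]
        have hF : cgF ((cgBsplit rest).headI :: (cgBsplit rest).tail) w
            = cgGoA rest false w := by rw [hsplit]; exact ih1 w
        simp only [cgF] at hF
        simp [cgGoSegs, ← hF]
      · have hA : cgGoA (c :: rest) true w
            = (cgEscd c ++ (cgGoA rest false w).1, (cgGoA rest false w).2) := by
          by_cases h1 : c = '*' ∨ c = '?'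
          · have h3 : ¬ (c = '_' ∨ c = '%') := by rcases h1 with h | h <;> subst h <;> simp
            simp [cgGoA, cgEscd, hc, h1]
            rcases h1 with h | h <;> subst h <;> simp
          · by_cases h3 : c = '_' ∨ c = '%'
            · simp [cgGoA, cgEscd, hc, h1, h3]
            · simp [cgGoA, cgEscd, hc, h1, h3]
        rw [hA, ← ih1 w]
        simp only [cgBsplit, if_neg hc]
        rw [← hsplit]
        simp [cgGoSegs, cgF, cgPlainSeg]

-- ===== VERDICT (by name: the statement is the Claim_ definition above) =====
theorem convert_glob_to_like_spec : Claim_equal_convert_glob_to_like := by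
  intro s _
  unfold Spec_convert_glob_to_like convert_glob_to_like convert_glob_to_like_alt
  cases s with
  | none => rfl
  | some s =>
    simp only
    rw [cgSplitOn_eq]
    rw [← cgHeadTail _ (cgBsplit_ne_nil s.toList)]
    have h := (cgMain s.toList).1 false
    rw [← cgHeadTail _ (cgBsplit_ne_nil s.toList)] at h
    simp only [cgF, Bool.false_or] at h
    simp [← h]
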